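-- pv_equiv track=rewrite | github.com/zathp/Open_Vision | OV_Libs/ProjStoreLib/pipeline_builder.py | build_dependency_map
-- ===== SOURCE A (Python) =====
-- from typing import Dict, List, Set, Tuple, Any, Iterable
--
-- def build_dependency_map(nodes: List[Dict[str, Any]], connections: List[Dict[str, str]]) -> Dict[str, List[str]]:
--     """
--     Build a mapping of each node to its input dependencies.
--
--     Args:
--         nodes: List of node dictionaries with 'id' keys
--         connections: List of connection dictionaries with 'from_node' and 'to_node' keys
--
--     Returns:
--         Dictionary mapping node_id -> list of input node_ids
--
--     Example:
--         >>> nodes = [{"id": "n1"}, {"id": "n2"}, {"id": "n3"}]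
--         >>> connections = [{"from_node": "n1", "to_node": "n2"}, {"from_node": "n2", "to_node": "n3"}]
--         >>> build_dependency_map(nodes, connections)
--         {'n1': [], 'n2': ['n1'], 'n3': ['n2']}
--     """
--     # Initialize all nodes with empty dependency lists
--     dependencies: Dict[str, List[str]] = {}
--     for node in nodes:
--         node_id = str(node.get("id", ""))
--         if node_id:
--             dependencies[node_id] = []
--
--     # Build dependency map from connections
--     for connection in connections:
--         from_node = str(connection.get("from_node", ""))
--         to_node = str(connection.get("to_node", ""))
--
--         # Only add valid connections between known nodes
--         if from_node and to_node and to_node in dependencies: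
--             if from_node not in dependencies[to_node]:
--                 dependencies[to_node].append(from_node)
--
--     return dependencies
-- ===== SOURCE B (Python) =====
-- def build_dependency_map(nodes, connections):
--     # Collect the known node ids once, first occurrence order, skipping falsy ids.
--     ids = []
--     for node in nodes:
--         node_id = str(node.get("id", ""))
--         if node_id and node_id not in ids:
--             ids.append(node_id)
--     # For each known node, scan the connections for its incoming edges.
--     result = {}
--     for node_id in ids:
--         deps = []
--         for connection in connections:
--             from_node = str(connection.get("from_node", ""))
--             if str(connection.get("to_node", "")) == node_id and from_node and from_node not in deps:
--                 deps.append(from_node)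
--         result[node_id] = deps
--     return result
-- ===== Notes on version B (the rewrite author's own statement) =====
-- stated objective: alternative
-- what changed: Replaces the init-pass plus single forward pass over connections mutating a shared dict with a node-major decomposition: dedup the valid node ids once, then for each node id independently scan the connections list collecting its incoming from_nodes with order-preserving dedup.
import Mathlib
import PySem

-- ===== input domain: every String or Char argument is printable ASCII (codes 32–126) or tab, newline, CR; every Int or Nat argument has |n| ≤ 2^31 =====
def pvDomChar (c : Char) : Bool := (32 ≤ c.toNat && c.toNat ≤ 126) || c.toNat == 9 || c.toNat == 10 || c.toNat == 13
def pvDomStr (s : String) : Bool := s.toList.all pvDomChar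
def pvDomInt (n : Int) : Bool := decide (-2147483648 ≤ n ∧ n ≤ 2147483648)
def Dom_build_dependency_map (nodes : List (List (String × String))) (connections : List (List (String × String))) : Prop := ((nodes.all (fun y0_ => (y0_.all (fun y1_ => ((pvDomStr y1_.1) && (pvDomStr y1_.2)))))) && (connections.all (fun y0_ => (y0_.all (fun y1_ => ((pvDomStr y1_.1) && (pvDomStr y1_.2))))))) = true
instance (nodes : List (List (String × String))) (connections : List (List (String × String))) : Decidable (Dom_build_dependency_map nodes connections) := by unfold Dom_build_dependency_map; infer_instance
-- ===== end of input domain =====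

-- B replaces A's single forward pass over connections (mutating a shared dict) with a
-- node-major decomposition: dedup the node ids once, then one scan of the connections per node;
-- alternative structure, not faster.


-- ===== PORT A =====
-- node.get("id", "") / connection.get(k, "") : first-match association-list lookup
def pvGetA (m : List (String × String)) (k : String) : String :=
  (PySem.Dict.mk m).getD k ""

-- dependencies[node_id] = [] for each truthy node id (one iteration of A's first loop)
def pvStepInit (d : PySem.Dict String (List String)) (node : List (String × String)) : PySem.Dict String (List String) :=
  if pvGetA node "id" ≠ "" then d.insert (pvGetA node "id") [] else d

-- one iteration of A's connections loop: guarded dedup-append to dependencies[to_node]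
def pvStepConn (d : PySem.Dict String (List String)) (connection : List (String × String)) : PySem.Dict String (List String) :=
  if pvGetA connection "from_node" ≠ "" ∧ pvGetA connection "to_node" ≠ "" ∧
      d.contains (pvGetA connection "to_node") then
    (if pvGetA connection "from_node" ∉ d.getD (pvGetA connection "to_node") [] then
       d.insert (pvGetA connection "to_node")
         (d.getD (pvGetA connection "to_node") [] ++ [pvGetA connection "from_node"])
     else d)
  else d

def build_dependency_map (nodes : List (List (String × String))) (connections : List (List (String × String))) : List (String × List String) :=
  (connections.foldl pvStepConn (nodes.foldl pvStepInit PySem.Dict.empty)).items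

-- ===== PORT B =====
-- one iteration of B's ids loop: first-occurrence dedup of the truthy node ids
def pvStepIds (ids : List String) (node : List (String × String)) : List String :=
  if pvGetA node "id" ≠ "" ∧ pvGetA node "id" ∉ ids then ids ++ [pvGetA node "id"] else ids

def pvIdsB (nodes : List (List (String × String))) : List String :=
  nodes.foldl pvStepIds []

-- one iteration of B's inner scan over connections, for one node id
def pvStep1 (node_id : String) (deps : List String) (connection : List (String × String)) : List String :=
  if pvGetA connection "to_node" = node_id ∧ pvGetA connection "from_node" ≠ "" ∧
      pvGetA connection "from_node" ∉ deps then
    deps ++ [pvGetA connection "from_node"]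
  else deps

def pvDepsB (connections : List (List (String × String))) (node_id : String) : List String :=
  connections.foldl (pvStep1 node_id) []

def build_dependency_map_alt (nodes : List (List (String × String))) (connections : List (List (String × String))) : List (String × List String) :=
  ((pvIdsB nodes).foldl (fun result node_id =>
      result.insert node_id (pvDepsB connections node_id))
    (PySem.Dict.empty : PySem.Dict String (List String))).items

-- ===== PRECONDITION & SPEC =====
def Spec_build_dependency_map (nodes : List (List (String × String))) (connections : List (List (String × String))) (out : List (String × List String)) : Prop := out = build_dependency_map_alt nodes connections
instance (nodes : List (List (String × String))) (connections : List (List (String × String))) (out : List (String × List String)) : Decidable (Spec_build_dependency_map nodes connections out) := by unfold Spec_build_dependency_map; infer_instance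

-- ===== CLAIM (what is proved, stated in full; the proofs are below) =====
def Claim_equal_build_dependency_map : Prop := ∀ (nodes : List (List (String × String))) (connections : List (List (String × String))), Dom_build_dependency_map nodes connections → Spec_build_dependency_map nodes connections (build_dependency_map nodes connections)

-- ===== LEMMAS AND PROOFS =====

-- the dict whose keys are ids and whose value at i is f i
def pvTab (ids : List String) (f : String → List String) : PySem.Dict String (List String) :=
  PySem.Dict.mk (ids.map (fun i => (i, f i)))

theorem pvTab_keys (ids : List String) (f : String → List String) :
    (pvTab ids f).keys = ids := by
  simp [pvTab, PySem.Dict.keys, List.map_map, Function.comp_def]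

theorem pvTab_contains (ids : List String) (f : String → List String) (t : String) :
    (pvTab ids f).contains t = decide (t ∈ ids) := by
  simp only [pvTab, PySem.Dict.contains_mk, List.any_map]
  induction ids with
  | nil => simp
  | cons a l ih =>
    simp only [List.any_cons, ih, List.mem_cons]
    by_cases h : t = a
    · simp [h]
    · simp [h, Ne.symm h]

theorem pvTab_getD (ids : List String) (f : String → List String) (i : String)
    (hi : i ∈ ids) (hnd : ids.Nodup) : (pvTab ids f).getD i [] = f i := by
  exact PySem.Dict.getD_of_mem_items (pvTab ids f) (List.mem_map_of_mem hi)
    (by rw [pvTab_keys]; exact hnd) []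

theorem pvTab_insert_mem (ids : List String) (f : String → List String) (t : String)
    (ht : t ∈ ids) (v : List String) :
    (pvTab ids f).insert t v = pvTab ids (fun i => if i = t then v else f i) := by
  apply PySem.Dict.ext
  rw [PySem.Dict.items_insert_of_contains _ _ (by rw [pvTab_contains]; simpa using ht)]
  simp only [pvTab, List.map_map]
  apply List.map_congr_left
  intro i _
  by_cases hik : i = t <;> simp [hik]

theorem pvTab_insert_not_mem (ids : List String) (f : String → List String) (t : String)
    (ht : t ∉ ids) (v : List String) :
    (pvTab ids f).insert t v = pvTab (ids ++ [t]) (fun i => if i = t then v else f i) := by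
  apply PySem.Dict.ext
  rw [PySem.Dict.items_insert_of_not_contains _ _ (by rw [pvTab_contains]; simpa using ht)]
  simp only [pvTab, List.map_append, List.map_cons, List.map_nil]
  congr 1
  apply List.map_congr_left
  intro i hi
  have : i ≠ t := fun e => ht (e ▸ hi)
  simp [this]

-- invariant of B's ids fold: nodup and no empty id
theorem pvIds_inv (nodes : List (List (String × String))) (ids : List String)
    (hnd : ids.Nodup) (hne : "" ∉ ids) :
    (nodes.foldl pvStepIds ids).Nodup ∧ "" ∉ nodes.foldl pvStepIds ids := by
  induction nodes generalizing ids with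
  | nil => exact ⟨hnd, hne⟩
  | cons node rest ih =>
    simp only [List.foldl_cons, pvStepIds]
    split_ifs with h
    · refine ih _ ?_ ?_
      · simp [List.nodup_append, hnd]
        exact fun a ha e => h.2 (e ▸ ha)
      · simp only [List.mem_append, List.mem_singleton, not_or]
        exact ⟨hne, fun e => h.1 e.symm⟩
    · exact ih _ hnd hne

-- A's node-init fold, started from a table of empty lists, is B's ids fold as a table
theorem pvInit_tab (nodes : List (List (String × String))) (ids : List String) :
    nodes.foldl pvStepInit (pvTab ids (fun _ => [])) =
    pvTab (nodes.foldl pvStepIds ids) (fun _ => []) := by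
  induction nodes generalizing ids with
  | nil => rfl
  | cons node rest ih =>
    simp only [List.foldl_cons, pvStepInit, pvStepIds]
    by_cases h0 : pvGetA node "id" = ""
    · simp only [h0, ne_eq, not_true_eq_false, if_false, false_and]
      exact ih ids
    · by_cases hm : pvGetA node "id" ∈ ids
      · rw [if_pos h0, if_neg (by simp [hm]), pvTab_insert_mem _ _ _ hm]
        have : (fun i => if i = pvGetA node "id" then ([] : List String) else []) =
            (fun _ => ([] : List String)) := by funext i; split <;> rfl
        rw [this]
        exact ih ids
      · rw [if_pos h0, if_pos ⟨h0, hm⟩, pvTab_insert_not_mem _ _ _ hm]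
        have : (fun i => if i = pvGetA node "id" then ([] : List String) else []) =
            (fun _ => ([] : List String)) := by funext i; split <;> rfl
        rw [this]
        exact ih (ids ++ [pvGetA node "id"])

-- pvTab only reads f on ids
theorem pvTab_congr (ids : List String) (f g : String → List String)
    (h : ∀ i ∈ ids, f i = g i) : pvTab ids f = pvTab ids g := by
  unfold pvTab
  congr 1
  exact List.map_congr_left (fun i hi => by rw [h i hi])

-- A's connections fold on a table with keys ids acts key-wise as B's inner scan
theorem pvConn_tab (connections : List (List (String × String))) (ids : List String)
    (f : String → List String) (hnd : ids.Nodup) (hne : "" ∉ ids) :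
    connections.foldl pvStepConn (pvTab ids f) =
    pvTab ids (fun i => connections.foldl (pvStep1 i) (f i)) := by
  induction connections generalizing f with
  | nil => rfl
  | cons c rest ih =>
    simp only [List.foldl_cons]
    by_cases hin : pvGetA c "from_node" ≠ "" ∧ pvGetA c "to_node" ∈ ids
    · -- the connection targets a known node
      have ht : pvGetA c "to_node" ≠ "" := fun e => hne (e ▸ hin.2)
      have hgv := pvTab_getD ids f _ hin.2 hnd
      by_cases hmem : pvGetA c "from_node" ∈ f (pvGetA c "to_node")
      · have hstep : pvStepConn (pvTab ids f) c = pvTab ids f := by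
          unfold pvStepConn
          rw [if_pos ⟨hin.1, ht, by rw [pvTab_contains]; simpa using hin.2⟩,
            if_neg (by rw [hgv]; simpa using hmem)]
        rw [hstep, ih f]
        apply pvTab_congr
        intro i hi
        congr 1
        unfold pvStep1
        by_cases hik : pvGetA c "to_node" = i
        · rw [if_neg]; intro hcond; exact hcond.2.2 (hik ▸ hmem)
        · rw [if_neg]; intro hcond; exact hik hcond.1
      · have hstep : pvStepConn (pvTab ids f) c =
            pvTab ids (fun i => if i = pvGetA c "to_node" then
              f (pvGetA c "to_node") ++ [pvGetA c "from_node"] else f i) := by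
          unfold pvStepConn
          rw [if_pos ⟨hin.1, ht, by rw [pvTab_contains]; simpa using hin.2⟩,
            if_pos (by rw [hgv]; simpa using hmem), hgv,
            pvTab_insert_mem _ _ _ hin.2]
        rw [hstep, ih]
        apply pvTab_congr
        intro i hi
        congr 1
        unfold pvStep1
        by_cases hik : pvGetA c "to_node" = i
        · rw [if_pos hik.symm, if_pos ⟨hik, hin.1, hik ▸ hmem⟩, hik]
        · rw [if_neg (fun e => hik e.symm), if_neg (fun hcond => hik hcond.1)]
    · -- skipped connection: every per-key step is a no-op too
      have hstep : pvStepConn (pvTab ids f) c = pvTab ids f := by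
        unfold pvStepConn
        rw [if_neg]
        rw [pvTab_contains]
        intro hcond
        exact hin ⟨hcond.1, by simpa using hcond.2.2⟩
      rw [hstep, ih f]
      apply pvTab_congr
      intro i hi
      congr 1
      unfold pvStep1
      rw [if_neg]
      intro hcond
      exact hin ⟨hcond.2.1, hcond.1 ▸ hi⟩

-- B's ids are nodup and nonempty
theorem pvIdsB_inv (nodes : List (List (String × String))) :
    (pvIdsB nodes).Nodup ∧ "" ∉ pvIdsB nodes := by
  unfold pvIdsB
  exact pvIds_inv nodes [] List.nodup_nil (by simp)

-- ===== VERDICT (by name: the statement is the Claim_ definition above) =====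
theorem build_dependency_map_spec : Claim_equal_build_dependency_map := by
  intro nodes connections _
  unfold Spec_build_dependency_map build_dependency_map build_dependency_map_alt
  have hids := pvIdsB_inv nodes
  have h0 : nodes.foldl pvStepInit PySem.Dict.empty = pvTab (pvIdsB nodes) (fun _ => []) :=
    pvInit_tab nodes []
  rw [h0, pvConn_tab connections (pvIdsB nodes) _ hids.1 hids.2]
  have hB : (pvIdsB nodes).foldl (fun result node_id =>
      result.insert node_id (pvDepsB connections node_id))
      (PySem.Dict.empty : PySem.Dict String (List String)) =
      pvTab (pvIdsB nodes) (pvDepsB connections) := by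
    apply PySem.Dict.ext
    rw [PySem.Dict.items_foldl_insert_fresh _ _ _ _ (by intro a _; simp)
      (by simpa using hids.1)]
    simp [pvTab, PySem.Dict.empty]
  rw [hB]
  rfl
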